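-- pv_equiv track=rewrite | github.com/Ashiq-am/Data-Structures-Algorithm | 1.Python Algorithms/11.Dynamic Programming/3.Basic Problems/58.Maximum weight path ending at any element of last row in a matrix/Maximum weight path ending at any element of last row in a matrix.py | maxCost
-- ===== SOURCE A (Python) =====
-- def maxCost(mat, N):
--     # creat 2D matrix to store the sum of the path
--     dp = [[0 for i in range(N)] for j in range(N)]
--
--     dp[0][0] = mat[0][0]
--
--     # Initialize first column of total weight
--     # array (dp[i to N][0])
--     for i in range(1, N):
--         dp[i][0] = mat[i][0] + dp[i - 1][0]
--
--     # Calculate rest path sum of weight matrix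
--     for i in range(1, N):
--         for j in range(1, min(i + 1, N)):
--             dp[i][j] = mat[i][j] + \
--                        max(dp[i - 1][j - 1],
--                            dp[i - 1][j])
--
--     # find the max weight path sum to reach
--     # the last row
--     result = 0
--     for i in range(N):
--         if (result < dp[N - 1][i]):
--             result = dp[N - 1][i]
--
--     # return maximum weight path sum
--     return result
-- ===== SOURCE B (Python) =====
-- def maxCost(mat, N):
--     # top-down memoized recursion instead of A's bottom-up N x N table
--     memo = {}
--
--     def best(i, j):
--         # best path weight ending at cell (i, j); 0 outside the triangle
--         if j < 0 or j > i:
--             return 0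
--         if (i, j) not in memo:
--             if i == 0:
--                 memo[(i, j)] = mat[0][0]
--             elif j == 0:
--                 memo[(i, j)] = mat[i][0] + best(i - 1, 0)
--             else:
--                 memo[(i, j)] = mat[i][j] + max(best(i - 1, j - 1), best(i - 1, j))
--         return memo[(i, j)]
--
--     return max(0, max(best(N - 1, j) for j in range(N)))
-- ===== Notes on version B (the rewrite author's own statement) =====
-- stated objective: alternative
-- what changed: Replaces A's bottom-up N x N dp table (separate first-column loop, nested fill loop, final scan of the last row) by top-down memoized recursion best(i,j) over the triangle, with the answer max(0, max(best(N-1,j) for j in range(N))).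
import Mathlib
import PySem

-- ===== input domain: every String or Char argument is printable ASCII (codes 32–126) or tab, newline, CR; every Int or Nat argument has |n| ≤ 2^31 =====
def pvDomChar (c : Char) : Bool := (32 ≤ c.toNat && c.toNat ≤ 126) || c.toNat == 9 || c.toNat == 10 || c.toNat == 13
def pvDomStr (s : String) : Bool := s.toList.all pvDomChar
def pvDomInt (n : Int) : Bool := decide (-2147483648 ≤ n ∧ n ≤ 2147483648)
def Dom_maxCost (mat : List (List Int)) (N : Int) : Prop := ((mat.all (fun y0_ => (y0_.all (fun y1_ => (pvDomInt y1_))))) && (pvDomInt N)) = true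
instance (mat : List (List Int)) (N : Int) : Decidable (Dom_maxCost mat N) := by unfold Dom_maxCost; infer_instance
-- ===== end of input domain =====

-- B replaces A's bottom-up N x N dp table by top-down recursion over the triangle (memoized in Python; the memo only speeds the Python up and does not change any value).

-- ===== PORT A =====
-- mat[i][j], totalised with default 0 (inside Pre_ every access is in range)
def pvGet2 (xss : List (List Int)) (i j : Int) : Int :=
  (PySem.List.pyGet? ((PySem.List.pyGet? xss i).getD []) j).getD 0

-- dp[i][j] = v, totalised (inside Pre_ every index is in range)
def pvSet2 (dp : List (List Int)) (i j : Int) (v : Int) : List (List Int) :=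
  PySem.List.pySetD dp i (PySem.List.pySetD ((PySem.List.pyGet? dp i).getD []) j v)

def maxCost (mat : List (List Int)) (N : Int) : Int :=
  let dp0 := (PySem.List.pyRange 0 N 1).map (fun _ => (PySem.List.pyRange 0 N 1).map (fun _ => (0 : Int)))
  let dp1 := pvSet2 dp0 0 0 (pvGet2 mat 0 0)
  let dp2 := (PySem.List.pyRange 1 N 1).foldl
    (fun dp i => pvSet2 dp i 0 (pvGet2 mat i 0 + pvGet2 dp (i - 1) 0)) dp1
  let dp3 := (PySem.List.pyRange 1 N 1).foldl
    (fun dp i =>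
      (PySem.List.pyRange 1 (min (i + 1) N) 1).foldl
        (fun dp j =>
          pvSet2 dp i j (pvGet2 mat i j + max (pvGet2 dp (i - 1) (j - 1)) (pvGet2 dp (i - 1) j))) dp)
    dp2
  (PySem.List.pyRange 0 N 1).foldl
    (fun result i => if result < pvGet2 dp3 (N - 1) i then pvGet2 dp3 (N - 1) i else result) 0

-- ===== PORT B =====
-- best(i, j) of Source B (the Python memo cache changes no value, only the running time)
def pvBest (mat : List (List Int)) (i j : Int) : Int :=
  if j < 0 ∨ j > i then 0
  else if i = 0 then pvGet2 mat 0 0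
  else if j = 0 then pvGet2 mat i 0 + pvBest mat (i - 1) 0
  else pvGet2 mat i j + max (pvBest mat (i - 1) (j - 1)) (pvBest mat (i - 1) j)
termination_by i.toNat
decreasing_by all_goals omega

def maxCost_alt (mat : List (List Int)) (N : Int) : Int :=
  max 0 ((PySem.List.max? ((PySem.List.pyRange 0 N 1).map (fun j => pvBest mat (N - 1) j))
    (fun x => x)).getD 0)

-- ===== PRECONDITION & SPEC =====
-- Pre_ = exactly the inputs on which both Pythons return: N >= 1, at least N rows, and row i
-- at least min(i+1, N) long (the accessed prefix). Outside it A raises IndexError (empty dp for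
-- N <= 0, or an out-of-range access) and B raises ValueError (empty max) or the same IndexError.
def Pre_maxCost (mat : List (List Int)) (N : Int) : Prop :=
  1 ≤ N ∧ N ≤ (mat.length : Int) ∧
    ∀ i ∈ List.range N.toNat, min (i + 1) N.toNat ≤ (mat.getD i []).length
instance (mat : List (List Int)) (N : Int) : Decidable (Pre_maxCost mat N) := by
  unfold Pre_maxCost; infer_instance

def pvWitness_maxCost : List (List Int) × Int := ([[1, 2], [3, 4]], 2)

def Spec_maxCost (mat : List (List Int)) (N : Int) (out : Int) : Prop := out = maxCost_alt mat N
instance (mat : List (List Int)) (N : Int) (out : Int) : Decidable (Spec_maxCost mat N out) := by unfold Spec_maxCost; infer_instance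

-- ===== CLAIM (what is proved, stated in full; the proofs are below) =====
def Claim_equal_maxCost : Prop := ∀ (mat : List (List Int)) (N : Int), Dom_maxCost mat N → Pre_maxCost mat N → Spec_maxCost mat N (maxCost mat N)

-- ===== LEMMAS AND PROOFS =====


-- Nat-indexed access into the dp table
def pvA2 (dp : List (List Int)) (i j : Nat) : Int := (dp.getD i []).getD j 0

-- Nat-indexed value function: the common mathematical content of both programs
def pvG (mat : List (List Int)) : Nat → Nat → Int
  | 0, j => if j = 0 then pvGet2 mat 0 0 else 0
  | (i + 1), j =>
      if i + 1 < j then 0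
      else if j = 0 then pvGet2 mat ((i : Int) + 1) 0 + pvG mat i 0
      else pvGet2 mat ((i : Int) + 1) (j : Int) + max (pvG mat i (j - 1)) (pvG mat i j)

theorem pvG_of_gt (mat : List (List Int)) (i j : Nat) (h : i < j) : pvG mat i j = 0 := by
  cases i with
  | zero => simp [pvG]; omega
  | succ i => simp [pvG, h]

theorem pvBest_eq (mat : List (List Int)) (i j : Nat) :
    pvBest mat (i : Int) (j : Int) = pvG mat i j := by
  induction i generalizing j with
  | zero =>
    rw [pvBest]
    by_cases hj : j = 0
    · subst hj; simp [pvG]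
    · simp only [pvG, hj, if_false]
      rw [if_pos (by push_cast; omega)]
  | succ i ih =>
    rw [pvBest]
    by_cases hgt : i + 1 < j
    · rw [if_pos (by push_cast; omega)]
      rw [pvG_of_gt mat _ _ hgt]
    · rw [if_neg (by push_cast; omega)]
      rw [if_neg (by push_cast; omega)]
      by_cases hj : j = 0
      · subst hj
        rw [if_pos (by norm_num)]
        have h1 : ((i + 1 : Nat) : Int) - 1 = (i : Int) := by push_cast; ring
        have hih := ih 0
        norm_num at hih
        rw [h1, hih]
        simp only [pvG]
        rw [if_neg (by omega)]
        push_cast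
        ring_nf
      · rw [if_neg (by exact_mod_cast hj)]
        have h1 : ((i + 1 : Nat) : Int) - 1 = (i : Int) := by push_cast; ring
        have h2 : ((j : Int)) - 1 = ((j - 1 : Nat) : Int) := by omega
        rw [h1, h2, ih (j - 1), ih j]
        simp only [pvG, hgt, if_false, hj]
        push_cast
        ring_nf

-- generic invariant rule for a fold over range(a, b)
theorem foldl_pyRange_inv {α : Type} (f : α → Int → α) (P : Int → α → Prop)
    (a b : Int) (hab : a ≤ b) (init : α) (h0 : P a init)
    (hstep : ∀ k x, a ≤ k → k < b → P k x → P (k + 1) (f x k)) :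
    P b ((PySem.List.pyRange a b 1).foldl f init) := by
  obtain ⟨d, hd⟩ : ∃ d : Nat, b = a + d := ⟨(b - a).toNat, by omega⟩
  subst hd
  clear hab
  induction d generalizing a init with
  | zero => simpa [PySem.List.pyRange_one_eq_nil] using h0
  | succ d ih =>
    rw [PySem.List.pyRange_one_cons (by push_cast; omega)]
    simp only [List.foldl_cons]
    have he : a + ((d + 1 : Nat) : Int) = (a + 1) + (d : Int) := by push_cast; ring
    rw [he]
    exact ih (a + 1) (f init a)
      (hstep a init le_rfl (by push_cast; omega) h0)
      (fun k x hk1 hk2 hP => hstep k x (by omega) (by push_cast at hk2 ⊢; omega) hP)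


theorem pvGet2_natCast (xss : List (List Int)) (i j : Nat) :
    pvGet2 xss (i : Int) (j : Int) = pvA2 xss i j := by
  simp [pvGet2, pvA2, PySem.List.pyGet?_natCast, List.getD_eq_getElem?_getD]

theorem pvSet2_natCast (dp : List (List Int)) (i j : Nat) (v : Int) :
    pvSet2 dp (i : Int) (j : Int) v = dp.set i ((dp.getD i []).set j v) := by
  simp [pvSet2, PySem.List.pySetD_natCast, PySem.List.pyGet?_natCast, List.getD_eq_getElem?_getD]

def pvShape (n : Nat) (dp : List (List Int)) : Prop :=
  dp.length = n ∧ ∀ r ∈ dp, r.length = n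

theorem pv_getD_set {α : Type} (l : List α) (j : Nat) (hj : j < l.length) (v : α) (j' : Nat) (d : α) :
    (l.set j v).getD j' d = if j' = j then v else l.getD j' d := by
  by_cases h : j' = j
  · subst h
    rw [if_pos rfl, List.getD_eq_getElem?_getD, List.getElem?_set_eq_of_lt v hj, Option.getD_some]
  · rw [if_neg h, List.getD_eq_getElem?_getD, List.getElem?_set_ne (fun hh => h hh.symm),
      ← List.getD_eq_getElem?_getD]

theorem pvShape_set2 (n : Nat) (dp : List (List Int)) (hs : pvShape n dp)
    (i j : Nat) (hi : i < n) (v : Int) : pvShape n (pvSet2 dp (i : Int) (j : Int) v) := by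
  rw [pvSet2_natCast]
  have hlen : i < dp.length := by rw [hs.1]; exact hi
  refine ⟨by simp [hs.1], ?_⟩
  intro r hr
  rcases List.mem_or_eq_of_mem_set hr with h | h
  · exact hs.2 r h
  · subst h
    rw [List.length_set]
    rw [List.getD_eq_getElem _ _ hlen]
    exact hs.2 _ (List.getElem_mem hlen)

theorem pvA2_set2 (n : Nat) (dp : List (List Int)) (hs : pvShape n dp)
    (i j : Nat) (hi : i < n) (hj : j < n) (v : Int) (i' j' : Nat) :
    pvA2 (pvSet2 dp (i : Int) (j : Int) v) i' j' =
      if i' = i ∧ j' = j then v else pvA2 dp i' j' := by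
  rw [pvSet2_natCast]
  have hlen : i < dp.length := by rw [hs.1]; exact hi
  have hrow : (dp.getD i []).length = n := by
    rw [List.getD_eq_getElem _ _ hlen]
    exact hs.2 _ (List.getElem_mem hlen)
  unfold pvA2
  rw [pv_getD_set dp i hlen _ i' []]
  by_cases hii : i' = i
  · rw [if_pos hii, pv_getD_set _ j (by omega) v j' 0]
    by_cases hjj : j' = j
    · simp [hii, hjj]
    · simp [hii, hjj]
  · simp [hii]

-- A's intermediate tables, named so the proofs can speak about them (maxCost is these by rfl)
def pvDp1 (mat : List (List Int)) (N : Int) : List (List Int) :=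
  pvSet2 ((PySem.List.pyRange 0 N 1).map (fun _ => (PySem.List.pyRange 0 N 1).map (fun _ => (0 : Int))))
    0 0 (pvGet2 mat 0 0)

def pvDp2 (mat : List (List Int)) (N : Int) : List (List Int) :=
  (PySem.List.pyRange 1 N 1).foldl
    (fun dp i => pvSet2 dp i 0 (pvGet2 mat i 0 + pvGet2 dp (i - 1) 0)) (pvDp1 mat N)

def pvDp3 (mat : List (List Int)) (N : Int) : List (List Int) :=
  (PySem.List.pyRange 1 N 1).foldl
    (fun dp i =>
      (PySem.List.pyRange 1 (min (i + 1) N) 1).foldl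
        (fun dp j =>
          pvSet2 dp i j (pvGet2 mat i j + max (pvGet2 dp (i - 1) (j - 1)) (pvGet2 dp (i - 1) j))) dp)
    (pvDp2 mat N)

theorem maxCost_eq_dp3 (mat : List (List Int)) (N : Int) :
    maxCost mat N = (PySem.List.pyRange 0 N 1).foldl
      (fun result i => if result < pvGet2 (pvDp3 mat N) (N - 1) i then pvGet2 (pvDp3 mat N) (N - 1) i else result) 0 := rfl

-- B's closed form: max(0, max(list, default=0)) of a nonempty list is a running max from 0
theorem pv_max0_foldl (t : List Int) : ∀ x : Int, max 0 (t.foldl max x) = t.foldl max (max 0 x) := by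
  induction t with
  | nil => intro x; rfl
  | cons y t ih =>
    intro x
    simp only [List.foldl_cons]
    rw [ih (max x y), max_assoc]

theorem pv_max_default_eq_foldl (L : List Int) (h : L ≠ []) :
    max 0 ((PySem.List.max? L (fun x => x)).getD 0) = L.foldl max 0 := by
  obtain ⟨x, t, rfl⟩ := List.exists_cons_of_ne_nil h
  rw [PySem.List.max?_id_cons]
  simp only [Option.getD_some, List.foldl_cons]
  rw [pv_max0_foldl]


theorem pvDp1_facts (mat : List (List Int)) (n : Nat) (hn : 1 ≤ n) :
    pvShape n (pvDp1 mat (n : Int)) ∧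
      ∀ i j, i < n → j < n →
        pvA2 (pvDp1 mat (n : Int)) i j = if i = 0 ∧ j = 0 then pvG mat 0 0 else 0 := by
  have hinner : (PySem.List.pyRange 0 (n : Int) 1).map (fun _ => (0 : Int)) = List.replicate n 0 := by
    rw [List.eq_replicate_iff]
    refine ⟨by simp [PySem.List.length_pyRange_one], ?_⟩
    intro b hb
    rcases List.mem_map.mp hb with ⟨_, _, rfl⟩; rfl
  have hdp0 : (PySem.List.pyRange 0 (n : Int) 1).map
      (fun _ => (PySem.List.pyRange 0 (n : Int) 1).map (fun _ => (0 : Int))) =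
      List.replicate n (List.replicate n 0) := by
    rw [List.eq_replicate_iff]
    refine ⟨by simp [PySem.List.length_pyRange_one], ?_⟩
    intro b hb
    rcases List.mem_map.mp hb with ⟨_, _, rfl⟩; exact hinner
  have hs0 : pvShape n (List.replicate n (List.replicate n 0)) := by
    refine ⟨by simp, ?_⟩
    intro r hr
    rw [List.eq_of_mem_replicate hr]; simp
  have ha0 : ∀ i j : Nat, pvA2 (List.replicate n (List.replicate n 0)) i j = 0 := by
    intro i j
    unfold pvA2
    simp only [List.getD_eq_getElem?_getD, List.getElem?_replicate]
    by_cases hi : i < n <;> by_cases hj : j < n <;> simp [hi, hj]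
  unfold pvDp1
  rw [hdp0]
  have hsh := pvShape_set2 n _ hs0 0 0 (by omega) (pvGet2 mat 0 0)
  have hvv := fun i' j' => pvA2_set2 n _ hs0 0 0 (by omega) (by omega) (pvGet2 mat 0 0) i' j'
  push_cast at hsh hvv
  refine ⟨hsh, ?_⟩
  intro i j hi hj
  rw [hvv i j, ha0]
  simp [pvG]

theorem pvDp2_facts (mat : List (List Int)) (n : Nat) (hn : 1 ≤ n) :
    pvShape n (pvDp2 mat (n : Int)) ∧
      ∀ i j, i < n → j < n →
        pvA2 (pvDp2 mat (n : Int)) i j = if j = 0 then pvG mat i 0 else 0 := by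
  unfold pvDp2
  have H := foldl_pyRange_inv
    (f := fun dp i => pvSet2 dp i 0 (pvGet2 mat i 0 + pvGet2 dp (i - 1) 0))
    (P := fun k dp => pvShape n dp ∧ ∀ i j, i < n → j < n →
      pvA2 dp i j = if j = 0 ∧ (i : Int) < k then pvG mat i 0 else 0)
    1 (n : Int) (by exact_mod_cast hn) (pvDp1 mat (n : Int)) ?_ ?_
  · obtain ⟨hs, hv⟩ := H
    refine ⟨hs, fun i j hi hj => ?_⟩
    rw [hv i j hi hj]
    have : (i : Int) < (n : Int) := by exact_mod_cast hi
    by_cases hj0 : j = 0 <;> simp [hj0, this]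
  · -- the initial table satisfies the invariant at k = 1
    obtain ⟨hs1, hv1⟩ := pvDp1_facts mat n hn
    refine ⟨hs1, fun i j hi hj => ?_⟩
    rw [hv1 i j hi hj]
    by_cases h : i = 0 ∧ j = 0
    · obtain ⟨rfl, rfl⟩ := h; simp
    · rw [if_neg h, if_neg (by omega)]
  · -- the loop body preserves the invariant
    intro k dp hk1 hk2 ⟨hs, hv⟩
    obtain ⟨kn, rfl⟩ : ∃ kn : Nat, k = (kn : Int) := ⟨k.toNat, by omega⟩
    have hkn1 : 1 ≤ kn := by exact_mod_cast hk1
    have hknn : kn < n := by exact_mod_cast hk2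
    -- the value written at (kn, 0)
    have hread : pvGet2 dp ((kn : Int) - 1) 0 = pvG mat (kn - 1) 0 := by
      have hc : ((kn : Int) - 1) = ((kn - 1 : Nat) : Int) := by omega
      have hg := pvGet2_natCast dp (kn - 1) 0
      push_cast at hg
      rw [hc, hg, hv (kn - 1) 0 (by omega) (by omega), if_pos ⟨rfl, by omega⟩]
    have hval : pvGet2 mat (kn : Int) 0 + pvGet2 dp ((kn : Int) - 1) 0 = pvG mat kn 0 := by
      obtain ⟨m, rfl⟩ : ∃ m : Nat, kn = m + 1 := ⟨kn - 1, by omega⟩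
      have hG : pvG mat (m + 1) 0 = pvGet2 mat ((m : Int) + 1) 0 + pvG mat m 0 := by
        simp [pvG]
      rw [hread]
      simp only [Nat.add_sub_cancel]
      rw [hG]
      push_cast
      ring_nf
    beta_reduce
    rw [hval]
    have hsh := pvShape_set2 n dp hs kn 0 hknn (pvG mat kn 0)
    have hvv := fun i' j' => pvA2_set2 n dp hs kn 0 hknn (by omega) (pvG mat kn 0) i' j'
    push_cast at hsh hvv
    refine ⟨hsh, fun i j hi hj => ?_⟩
    rw [hvv i j, hv i j hi hj]
    by_cases hc : i = kn ∧ j = 0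
    · obtain ⟨rfl, rfl⟩ := hc
      rw [if_pos ⟨rfl, rfl⟩, if_pos ⟨rfl, by omega⟩]
    · rw [if_neg hc]
      by_cases hc2 : j = 0 ∧ (i : Int) < (kn : Int)
      · rw [if_pos hc2, if_pos ⟨hc2.1, by omega⟩]
      · rw [if_neg hc2, if_neg (by omega)]


theorem pvDp3_facts (mat : List (List Int)) (n : Nat) (hn : 1 ≤ n) :
    pvShape n (pvDp3 mat (n : Int)) ∧
      ∀ i j, i < n → j < n → pvA2 (pvDp3 mat (n : Int)) i j = pvG mat i j := by
  unfold pvDp3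
  have H := foldl_pyRange_inv
    (f := fun dp i =>
      (PySem.List.pyRange 1 (min (i + 1) (n : Int)) 1).foldl
        (fun dp j =>
          pvSet2 dp i j (pvGet2 mat i j + max (pvGet2 dp (i - 1) (j - 1)) (pvGet2 dp (i - 1) j))) dp)
    (P := fun k dp => pvShape n dp ∧ ∀ i j, i < n → j < n →
      pvA2 dp i j = if (i : Int) < k ∨ j = 0 then pvG mat i j else 0)
    1 (n : Int) (by exact_mod_cast hn) (pvDp2 mat (n : Int)) ?_ ?_
  · obtain ⟨hs, hv⟩ := H
    refine ⟨hs, fun i j hi hj => ?_⟩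
    rw [hv i j hi hj, if_pos (Or.inl (by exact_mod_cast hi))]
  · -- the table after the first-column loop satisfies the invariant at k = 1
    obtain ⟨hs2, hv2⟩ := pvDp2_facts mat n hn
    refine ⟨hs2, fun i j hi hj => ?_⟩
    rw [hv2 i j hi hj]
    by_cases hj0 : j = 0
    · subst hj0; rw [if_pos rfl, if_pos (Or.inr rfl)]
    · rw [if_neg hj0]
      by_cases hi0 : (i : Int) < 1
      · rw [if_pos (Or.inl hi0)]
        have : i = 0 := by omega
        subst this
        simp [pvG, hj0]
      · rw [if_neg (by omega)]
  · -- one outer iteration: fill row kn then move the frontier one row down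
    intro k dp hk1 hk2 ⟨hs, hv⟩
    beta_reduce
    obtain ⟨kn, rfl⟩ : ∃ kn : Nat, k = (kn : Int) := ⟨k.toNat, by omega⟩
    have hkn1 : 1 ≤ kn := by exact_mod_cast hk1
    have hknn : kn < n := by exact_mod_cast hk2
    have Hin := foldl_pyRange_inv
      (f := fun dp j =>
        pvSet2 dp (kn : Int) j
          (pvGet2 mat (kn : Int) j +
            max (pvGet2 dp ((kn : Int) - 1) (j - 1)) (pvGet2 dp ((kn : Int) - 1) j)))
      (P := fun t dp => pvShape n dp ∧ ∀ i j, i < n → j < n →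
        pvA2 dp i j =
          if (i : Int) < (kn : Int) ∨ j = 0 ∨ ((i : Int) = (kn : Int) ∧ (j : Int) < t)
          then pvG mat i j else 0)
      1 (min ((kn : Int) + 1) (n : Int))
      (le_min (by omega) (by exact_mod_cast hn)) dp ?_ ?_
    · obtain ⟨hs', hv'⟩ := Hin
      simp only [lt_min_iff] at hv'
      refine ⟨hs', fun i j hi hj => ?_⟩
      rw [hv' i j hi hj]
      by_cases hc : (i : Int) < (kn : Int) ∨ j = 0 ∨
          ((i : Int) = (kn : Int) ∧ ((j : Int) < (kn : Int) + 1 ∧ (j : Int) < (n : Int)))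
      · have hd2 : (i : Int) < (kn : Int) + 1 ∨ j = 0 := by
          rcases hc with h | h | h
          exacts [Or.inl (by omega), Or.inr h, Or.inl (by omega)]
        rw [if_pos hc, if_pos hd2]
      · rw [if_neg hc]
        by_cases hd : (i : Int) < (kn : Int) + 1 ∨ j = 0
        · rw [if_pos hd]
          have hik : i = kn := by omega
          subst hik
          have hjk : i < j := by
            have hjn : (j : Int) < (n : Int) := by exact_mod_cast hj
            omega
          rw [pvG_of_gt mat i j hjk]
        · rw [if_neg hd]
    · -- the row-kn inner loop starts with nothing of row kn (beyond column 0) filled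
      refine ⟨hs, fun i j hi hj => ?_⟩
      rw [hv i j hi hj]
      by_cases hc : (i : Int) < (kn : Int) ∨ j = 0
      · rw [if_pos hc, if_pos (by rcases hc with h | h; exacts [Or.inl h, Or.inr (Or.inl h)])]
      · rw [if_neg hc, if_neg (by omega)]
    · -- one inner iteration: write cell (kn, tn)
      intro t dp' ht1 ht2 ⟨hs', hv'⟩
      beta_reduce
      obtain ⟨tn, rfl⟩ : ∃ tn : Nat, t = (tn : Int) := ⟨t.toNat, by omega⟩
      have htn1 : 1 ≤ tn := by exact_mod_cast ht1
      rw [lt_min_iff] at ht2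
      have htnk : tn ≤ kn := by omega
      have htnn : tn < n := by exact_mod_cast ht2.2
      have hr1 : pvGet2 dp' ((kn : Int) - 1) ((tn : Int) - 1) = pvG mat (kn - 1) (tn - 1) := by
        have hc1 : ((kn : Int) - 1) = ((kn - 1 : Nat) : Int) := by omega
        have hc2 : ((tn : Int) - 1) = ((tn - 1 : Nat) : Int) := by omega
        rw [hc1, hc2, pvGet2_natCast,
          hv' (kn - 1) (tn - 1) (by omega) (by omega), if_pos (Or.inl (by omega))]
      have hr2 : pvGet2 dp' ((kn : Int) - 1) (tn : Int) = pvG mat (kn - 1) tn := by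
        have hc1 : ((kn : Int) - 1) = ((kn - 1 : Nat) : Int) := by omega
        rw [hc1, pvGet2_natCast,
          hv' (kn - 1) tn (by omega) htnn, if_pos (Or.inl (by omega))]
      have hval : pvGet2 mat (kn : Int) (tn : Int) +
          max (pvGet2 dp' ((kn : Int) - 1) ((tn : Int) - 1)) (pvGet2 dp' ((kn : Int) - 1) (tn : Int)) =
          pvG mat kn tn := by
        rw [hr1, hr2]
        obtain ⟨m, rfl⟩ : ∃ m : Nat, kn = m + 1 := ⟨kn - 1, by omega⟩
        simp only [pvG, Nat.add_sub_cancel]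
        rw [if_neg (by omega), if_neg (by omega)]
        push_cast
        ring_nf
      rw [hval]
      have hsh := pvShape_set2 n dp' hs' kn tn hknn (pvG mat kn tn)
      have hvv := fun i' j' => pvA2_set2 n dp' hs' kn tn hknn htnn (pvG mat kn tn) i' j'
      refine ⟨hsh, fun i j hi hj => ?_⟩
      rw [hvv i j, hv' i j hi hj]
      by_cases hc : i = kn ∧ j = tn
      · obtain ⟨rfl, rfl⟩ := hc
        rw [if_pos ⟨rfl, rfl⟩, if_pos (Or.inr (Or.inr ⟨rfl, by omega⟩))]
      · rw [if_neg hc]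
        by_cases hc2 : (i : Int) < (kn : Int) ∨ j = 0 ∨ ((i : Int) = (kn : Int) ∧ (j : Int) < (tn : Int))
        · have hd2 : (i : Int) < (kn : Int) ∨ j = 0 ∨ ((i : Int) = (kn : Int) ∧ (j : Int) < (tn : Int) + 1) := by
            rcases hc2 with h | h | h
            exacts [Or.inl h, Or.inr (Or.inl h), Or.inr (Or.inr ⟨h.1, by omega⟩)]
          rw [if_pos hc2, if_pos hd2]
        · rw [if_neg hc2, if_neg (by omega)]


theorem maxCost_eq (mat : List (List Int)) (n : Nat) (hn : 1 ≤ n) :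
    maxCost mat (n : Int) = maxCost_alt mat (n : Int) := by
  obtain ⟨hs3, hv3⟩ := pvDp3_facts mat n hn
  have hval : ∀ k : Nat, k < n →
      pvGet2 (pvDp3 mat (n : Int)) ((n : Int) - 1) ((0 : Int) + (k : Int)) = pvG mat (n - 1) k := by
    intro k hk
    have hc : ((n : Int) - 1) = ((n - 1 : Nat) : Int) := by omega
    have hz : ((0 : Int) + (k : Int)) = (k : Int) := by ring
    rw [hc, hz, pvGet2_natCast, hv3 (n - 1) k (by omega) hk]
  -- A's final scan is a running max over the last row
  rw [maxCost_eq_dp3, PySem.List.pyRange_one, List.foldl_map]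
  rw [show (((n : Int) - 0).toNat) = n from by omega]
  have hA := PySem.List.foldl_congr_mem
    (l := List.range n)
    (f := fun r (k : Nat) =>
      if r < pvGet2 (pvDp3 mat (n : Int)) ((n : Int) - 1) ((0 : Int) + (k : Int))
      then pvGet2 (pvDp3 mat (n : Int)) ((n : Int) - 1) ((0 : Int) + (k : Int)) else r)
    (g := fun r (k : Nat) => max r (pvG mat (n - 1) k))
    (init := 0)
    (by
      intro r k hk
      simp only []
      rw [hval k (List.mem_range.mp hk)]
      rcases lt_or_ge r (pvG mat (n - 1) k) with h | h
      · rw [if_pos h, max_eq_right h.le]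
      · rw [if_neg (not_lt.mpr h), max_eq_left h])
  rw [hA]
  -- B's max(0, max(..., default=0)) is the same running max
  unfold maxCost_alt
  rw [PySem.List.pyRange_one, List.map_map]
  rw [show (((n : Int) - 0).toNat) = n from by omega]
  have hB : (List.range n).map ((fun j => pvBest mat ((n : Int) - 1) j) ∘ fun k : Nat => 0 + (k : Int)) =
      (List.range n).map (fun k : Nat => pvG mat (n - 1) k) := by
    refine List.map_congr_left ?_
    intro k hk
    simp only [Function.comp]
    have hc : ((n : Int) - 1) = ((n - 1 : Nat) : Int) := by omega
    have hz : ((0 : Int) + (k : Int)) = (k : Int) := by ring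
    rw [hc, hz, pvBest_eq]
  rw [hB, pv_max_default_eq_foldl _ (by simp [List.map_eq_nil_iff, List.range_eq_nil]; omega),
    List.foldl_map]


-- ===== VERDICT (by name: the statement is the Claim_ definition above) =====
theorem maxCost_spec : Claim_equal_maxCost := by
  intro mat N _ hpre
  unfold Spec_maxCost
  obtain ⟨hN1, -, -⟩ := hpre
  obtain ⟨n, rfl⟩ : ∃ n : Nat, N = (n : Int) := ⟨N.toNat, by omega⟩
  exact maxCost_eq mat n (by exact_mod_cast hN1)
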